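-- pv_equiv track=rewrite | github.com/Wbx0710/HuPERWM | wm_agent.py | phones_to_words
-- ===== SOURCE A (Python) =====
-- from typing import Dict, List, Optional, Tuple
--
-- def phones_to_words(phones: List[str], silence: str = "SIL") -> List[str]:
--     """Split a phone sequence into words at silence boundaries.
--
--     Falls back to treating each phone sequence between silences as one
--     word-token (joined phones).  This works as a simple baseline even
--     without a full lexicon.
--     """
--     if not phones:
--         return []
--     words: List[str] = []
--     current: List[str] = []
--     for ph in phones:
--         if ph.upper() == silence or ph == "|" or ph == " ":
--             if current:
--                 words.append(" ".join(current))
--                 current = []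
--         else:
--             current.append(ph)
--     if current:
--         words.append(" ".join(current))
--     return words
-- ===== SOURCE B (Python) =====
-- def phones_to_words(phones, silence="SIL"):
--     def is_sep(ph):
--         return ph.upper() == silence or ph == "|" or ph == " "
--     n = len(phones)
--     bounds = [-1] + [i for i, ph in enumerate(phones) if is_sep(ph)] + [n]
--     return [" ".join(phones[a + 1:b])
--             for a, b in zip(bounds, bounds[1:])
--             if b - a > 1]
-- ===== Notes on version B (the rewrite author's own statement) =====
-- stated objective: alternative
-- what changed: Replaces A's single-pass words/current accumulator loop with a staged index computation: collect the separator positions via enumerate, pad them with -1 and len(phones), and slice a joined word out of phones between each pair of consecutive boundaries that are more than one position apart.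
import Mathlib
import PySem

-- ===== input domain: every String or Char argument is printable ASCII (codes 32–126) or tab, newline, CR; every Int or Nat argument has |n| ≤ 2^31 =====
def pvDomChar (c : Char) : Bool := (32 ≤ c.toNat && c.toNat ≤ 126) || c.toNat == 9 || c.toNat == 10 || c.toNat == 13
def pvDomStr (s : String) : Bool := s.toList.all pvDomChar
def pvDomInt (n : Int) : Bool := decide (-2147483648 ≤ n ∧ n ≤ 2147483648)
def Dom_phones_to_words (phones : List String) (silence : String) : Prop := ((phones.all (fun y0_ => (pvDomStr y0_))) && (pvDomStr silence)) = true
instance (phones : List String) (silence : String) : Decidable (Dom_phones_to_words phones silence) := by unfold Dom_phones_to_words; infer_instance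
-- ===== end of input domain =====

-- B computes the list of separator boundary indices in a staged pass and slices the words
-- out between consecutive boundaries, instead of A's incremental words/current accumulator
-- loop (alternative; same O(total length) cost).


-- ===== PORT A =====
-- literal port of A: fold carrying (words, current), then flush current
def phones_to_words (phones : List String) (silence : String) : List String :=
  if phones = [] then []
  else
    let st := phones.foldl (fun (st : List String × List String) ph =>
      if PySem.Str.upper ph == silence || ph == "|" || ph == " " then
        if st.2 ≠ [] then (st.1 ++ [PySem.Str.join " " st.2], []) else st
      else (st.1, st.2 ++ [ph])) ([], [])
    if st.2 ≠ [] then st.1 ++ [PySem.Str.join " " st.2] else st.1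

-- ===== PORT B =====
-- is_sep predicate of Source B
def pvIsSep (silence ph : String) : Bool :=
  PySem.Str.upper ph == silence || ph == "|" || ph == " "

-- Source B: bounds = [-1] + [i for i, ph in enumerate(phones) if is_sep(ph)] + [n];
--       [" ".join(phones[a+1:b]) for a, b in zip(bounds, bounds[1:]) if b - a > 1]
def pvBoundsOf (phones : List String) (silence : String) : List Int :=
  [-1] ++ ((PySem.List.enumerate phones 0).filter (fun p => pvIsSep silence p.2)).map (fun p => p.1)
    ++ [(phones.length : Int)]

def phones_to_words_alt (phones : List String) (silence : String) : List String :=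
  (((pvBoundsOf phones silence).zip (PySem.List.slice (pvBoundsOf phones silence) (some 1) none)).filter
      (fun ab => decide (ab.2 - ab.1 > 1))).map
    (fun ab => PySem.Str.join " " (PySem.List.slice phones (some (ab.1 + 1)) (some ab.2)))

-- ===== PRECONDITION & SPEC =====
def Spec_phones_to_words (phones : List String) (silence : String) (out : List String) : Prop := out = phones_to_words_alt phones silence
instance (phones : List String) (silence : String) (out : List String) : Decidable (Spec_phones_to_words phones silence out) := by unfold Spec_phones_to_words; infer_instance

-- ===== CLAIM (what is proved, stated in full; the proofs are below) =====
def Claim_equal_phones_to_words : Prop := ∀ (phones : List String) (silence : String), Dom_phones_to_words phones silence → Spec_phones_to_words phones silence (phones_to_words phones silence)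

-- ===== LEMMAS AND PROOFS =====

-- recursive reformulation of A's loop tail: remaining output given current accumulator
def pvGo (silence : String) (cur : List String) : List String → List String
  | [] => if cur ≠ [] then [PySem.Str.join " " cur] else []
  | ph :: rest =>
    if pvIsSep silence ph then
      if cur ≠ [] then PySem.Str.join " " cur :: pvGo silence [] rest
      else pvGo silence [] rest
    else pvGo silence (cur ++ [ph]) rest

theorem pvFoldl_eq_go (silence : String) (phones : List String) :
    ∀ ws cur,
      (let st := phones.foldl (fun (st : List String × List String) ph =>
        if PySem.Str.upper ph == silence || ph == "|" || ph == " " then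
          if st.2 ≠ [] then (st.1 ++ [PySem.Str.join " " st.2], []) else st
        else (st.1, st.2 ++ [ph])) (ws, cur)
      if st.2 ≠ [] then st.1 ++ [PySem.Str.join " " st.2] else st.1)
      = ws ++ pvGo silence cur phones := by
  induction phones with
  | nil =>
    intro ws cur
    simp only [List.foldl_nil, pvGo]
    split <;> simp
  | cons ph rest ih =>
    intro ws cur
    simp only [List.foldl_cons, pvGo, pvIsSep]
    by_cases h : (PySem.Str.upper ph == silence || ph == "|" || ph == " ") = true
    · simp only [h]
      by_cases hc : cur ≠ []
      · simpa [hc] using ih (ws ++ [PySem.Str.join " " cur]) []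
      · simp only [hc, ite_false]
        simp at hc
        simpa [hc] using ih ws []
    · simp only [h]
      simpa [h] using ih ws (cur ++ [ph])

theorem pvGo_sep (silence ph : String) (rest : List String)
    (h : pvIsSep silence ph = true) :
    pvGo silence [] (ph :: rest) = pvGo silence [] rest := by
  simp [pvGo, h]

theorem pvGo_take_nonseps (silence : String) (grp : List String)
    (h : ∀ y ∈ grp, pvIsSep silence y = false) :
    ∀ cur rest, pvGo silence cur (grp ++ rest) = pvGo silence (cur ++ grp) rest := by
  induction grp with
  | nil => intro cur rest; simp
  | cons y t ih =>
    intro cur rest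
    rw [List.cons_append]
    show pvGo silence cur (y :: (t ++ rest)) = _
    rw [pvGo, if_neg (by simp [h y (by simp)])]
    rw [ih (fun z hz => h z (by simp [hz]))]
    simp

theorem pvGo_flush (silence : String) (cur rest : List String)
    (hc : cur ≠ [])
    (hr : rest = [] ∨ ∃ s r', rest = s :: r' ∧ pvIsSep silence s = true) :
    pvGo silence cur rest = PySem.Str.join " " cur :: pvGo silence [] rest := by
  rcases hr with h | ⟨s, r', h, hs⟩
  · subst h; simp [pvGo, hc]
  · subst h; simp [pvGo, hs, hc]

-- B-side analysis: separator positions, boundary list, and words-by-slicing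
def pvPos (silence : String) : List String → List Nat
  | [] => []
  | x :: xs =>
    if pvIsSep silence x then 0 :: (pvPos silence xs).map (· + 1)
    else (pvPos silence xs).map (· + 1)

def pvBounds (silence : String) (xs : List String) : List Int :=
  -1 :: ((pvPos silence xs).map (fun k : Nat => (k : Int)) ++ [(xs.length : Int)])

def pvPairs (l : List Int) : List (Int × Int) := l.zip l.tail

def pvBW (silence : String) (xs : List String) : List String :=
  ((pvPairs (pvBounds silence xs)).filter (fun ab => decide (ab.2 - ab.1 > 1))).map
    (fun ab => PySem.Str.join " " (PySem.List.slice xs (some (ab.1 + 1)) (some ab.2)))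

theorem pvEnum_filter (silence : String) : ∀ (xs : List String) (s : Int),
    ((PySem.List.enumerate xs s).filter (fun p => pvIsSep silence p.2)).map (fun p => p.1)
      = (pvPos silence xs).map (fun k : Nat => s + (k : Int)) := by
  intro xs
  induction xs with
  | nil => intro s; simp [PySem.List.enumerate_nil, pvPos]
  | cons x t ih =>
    intro s
    rw [PySem.List.enumerate_cons]
    by_cases h : pvIsSep silence x = true
    · rw [List.filter_cons, if_pos (show pvIsSep silence (s, x).2 = true from h)]
      rw [List.map_cons, ih (s + 1)]
      simp only [pvPos, h, if_true, List.map_cons, List.map_map]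
      refine congrArg₂ _ (by simp) ?_
      exact List.map_congr_left (fun k _ => by simp [Function.comp]; try omega)
    · rw [List.filter_cons, if_neg (show ¬ pvIsSep silence (s, x).2 = true from by simpa using h)]
      rw [ih (s + 1)]
      simp only [pvPos, h, Bool.false_eq_true, if_false, List.map_map]
      exact List.map_congr_left (fun k _ => by simp [Function.comp]; try omega)

theorem pvAlt_eq_BW (phones : List String) (silence : String) :
    phones_to_words_alt phones silence = pvBW silence phones := by
  unfold phones_to_words_alt pvBoundsOf pvBW pvPairs pvBounds
  rw [PySem.List.slice_from_one, pvEnum_filter]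
  have h0 : List.map (fun k : Nat => (0 : Int) + (k : Int)) (pvPos silence phones)
      = List.map (fun k : Nat => (k : Int)) (pvPos silence phones) :=
    List.map_congr_left (fun k _ => by omega)
  rw [h0]
  rfl

-- shifting both slice bounds past a prefix
theorem pvSlice_shift {α : Type} (pre l : List α) (a b : Int) (ha : 0 ≤ a) (hb : 0 ≤ b) :
    PySem.List.slice (pre ++ l) (some (a + (pre.length : Int))) (some (b + (pre.length : Int)))
      = PySem.List.slice l (some a) (some b) := by
  rw [PySem.List.slice_toNat (pre ++ l) (by omega) (by omega), PySem.List.slice_toNat l ha hb]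
  have h1 : (a + (pre.length : Int)).toNat = pre.length + a.toNat := by omega
  have h2 : (b + (pre.length : Int)).toNat - (a + (pre.length : Int)).toNat = b.toNat - a.toNat := by omega
  rw [h2, h1, List.drop_append]
  have h3 : pre.length + a.toNat - pre.length = a.toNat := by omega
  have h4 : List.drop (pre.length + a.toNat) pre = [] := List.drop_eq_nil_of_le (by omega)
  rw [h3, h4, List.nil_append]

theorem pvMem_pairs (l : List Int) (a b : Int) (h : (a, b) ∈ pvPairs l) :
    a ∈ l ∧ b ∈ l.tail := List.of_mem_zip h

theorem pvTail_bounds_nonneg (silence : String) (xs : List String) (b : Int)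
    (hb : b ∈ (pvBounds silence xs).tail) : 0 ≤ b := by
  simp only [pvBounds, List.tail_cons, List.mem_append, List.mem_map, List.mem_singleton] at hb
  rcases hb with ⟨k, _, rfl⟩ | rfl <;> positivity

theorem pvPairs_map (f : Int → Int) (l : List Int) :
    pvPairs (l.map f) = (pvPairs l).map (Prod.map f f) := by
  unfold pvPairs
  rw [← List.map_tail, List.zip_map]

-- shared tail step: shifting all boundary pairs past a prefix of the phone list
theorem pvShift_block (pre rest : List String) (P : List (Int × Int))
    (hmem : ∀ ab ∈ P, (-1 : Int) ≤ ab.1 ∧ 0 ≤ ab.2) :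
    (((P.map (Prod.map (· + (pre.length : Int)) (· + (pre.length : Int)))).filter
        (fun ab => decide (ab.2 - ab.1 > 1))).map
      (fun ab => PySem.Str.join " " (PySem.List.slice (pre ++ rest) (some (ab.1 + 1)) (some ab.2))))
    = ((P.filter (fun ab => decide (ab.2 - ab.1 > 1))).map
      (fun ab => PySem.Str.join " " (PySem.List.slice rest (some (ab.1 + 1)) (some ab.2)))) := by
  rw [List.filter_map, List.map_map]
  have hp : (fun ab : Int × Int => decide (ab.2 - ab.1 > 1)) ∘ Prod.map (· + (pre.length : Int)) (· + (pre.length : Int))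
      = fun ab : Int × Int => decide (ab.2 - ab.1 > 1) := by
    funext ab
    simp only [Function.comp, Prod.map]
    exact decide_eq_decide.mpr (by omega)
  rw [hp]
  refine List.map_congr_left ?_
  intro ab hab
  obtain ⟨h1, h2⟩ := hmem ab (List.mem_of_mem_filter hab)
  simp only [Function.comp, Prod.map]
  have harg : ab.1 + (pre.length : Int) + 1 = (ab.1 + 1) + (pre.length : Int) := by ring
  rw [harg, pvSlice_shift pre rest (ab.1 + 1) ab.2 (by omega) h2]

theorem pvBW_nil (silence : String) : pvBW silence [] = [] := rfl

theorem pvBW_sep_cons (silence x : String) (xs : List String) (h : pvIsSep silence x = true) :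
    pvBW silence (x :: xs) = pvBW silence xs := by
  have hmm : List.map (fun k : Nat => (k : Int)) ((pvPos silence xs).map (· + 1))
      = (List.map (fun k : Nat => (k : Int)) (pvPos silence xs)).map (· + 1) := by
    rw [List.map_map, List.map_map]
    exact List.map_congr_left (fun k _ => by simp [Function.comp]; try omega)
  have hb : pvBounds silence (x :: xs) = -1 :: (pvBounds silence xs).map (· + 1) := by
    simp only [pvBounds, pvPos, h, if_true, List.map_cons, List.length_cons, Nat.cast_zero,
      Nat.cast_add, Nat.cast_one, hmm, List.map_append]
    norm_num
  unfold pvBW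
  rw [hb]
  have hcons : pvBounds silence xs = -1 :: (pvBounds silence xs).tail := rfl
  have hM : (pvBounds silence xs).map (· + 1)
      = ((-1 : Int) + 1) :: ((pvBounds silence xs).tail.map (· + 1)) := by
    conv_lhs => rw [hcons]
    rfl
  have hpairs : pvPairs (-1 :: (pvBounds silence xs).map (· + 1))
      = (-1, (-1 : Int) + 1) :: pvPairs ((pvBounds silence xs).map (· + 1)) := by
    rw [hM]; rfl
  rw [hpairs, List.filter_cons, pvPairs_map]
  norm_num
  have hone : (fun b : Int => b + 1) = (fun b : Int => b + ((([x] : List String).length : Int))) := by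
    funext b; simp
  rw [hone]
  exact pvShift_block [x] xs (pvPairs (pvBounds silence xs))
    (fun ab hab => by
      obtain ⟨h1, h2⟩ := pvMem_pairs _ ab.1 ab.2 (by simpa using hab)
      refine ⟨?_, pvTail_bounds_nonneg silence xs ab.2 h2⟩
      rw [hcons] at h1
      rcases List.mem_cons.mp h1 with h1 | h1
      · omega
      · have := pvTail_bounds_nonneg silence xs ab.1 h1; omega)

theorem pvPos_append (silence : String) (grp rest : List String)
    (h : ∀ y ∈ grp, pvIsSep silence y = false) :
    pvPos silence (grp ++ rest) = (pvPos silence rest).map (· + grp.length) := by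
  induction grp with
  | nil => simp
  | cons y t ih =>
    rw [List.cons_append]
    show pvPos silence (y :: (t ++ rest)) = _
    rw [pvPos, if_neg (by simp [h y (by simp)])]
    rw [ih (fun z hz => h z (by simp [hz])), List.map_map]
    simp only [List.length_cons]
    exact List.map_congr_left (fun k _ => by simp [Function.comp]; try omega)

theorem pvBounds_append_run (silence : String) (grp rest : List String)
    (h : ∀ y ∈ grp, pvIsSep silence y = false) :
    pvBounds silence (grp ++ rest)
      = -1 :: ((pvBounds silence rest).tail.map (· + (grp.length : Int))) := by
  simp only [pvBounds, List.tail_cons]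
  rw [pvPos_append silence grp rest h]
  refine congrArg _ ?_
  rw [List.map_append, List.map_map, List.map_map]
  refine congrArg₂ _ ?_ ?_
  · exact List.map_congr_left (fun k _ => by simp [Function.comp])
  · simp only [List.map_cons, List.map_nil, List.length_append]
    push_cast
    simp [add_comm]

theorem pvBW_run (silence : String) (grp rest : List String)
    (hg : grp ≠ []) (hall : ∀ y ∈ grp, pvIsSep silence y = false)
    (hr : rest = [] ∨ ∃ s r', rest = s :: r' ∧ pvIsSep silence s = true) :
    pvBW silence (grp ++ rest) = PySem.Str.join " " grp :: pvBW silence rest := by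
  have hglen : 1 ≤ grp.length := by
    cases grp with | nil => exact absurd rfl hg | cons a t => simp
  have hT : ∃ t0 T', (pvBounds silence rest).tail = t0 :: T' ∧ t0 = 0 := by
    rcases hr with h | ⟨s, r', h, hs⟩
    · subst h; exact ⟨0, [], rfl, rfl⟩
    · subst h
      refine ⟨0, List.map (fun k : Nat => (k : Int)) ((pvPos silence r').map (· + 1))
          ++ [(((s :: r' : List String)).length : Int)], ?_, rfl⟩
      simp only [pvBounds, List.tail_cons, pvPos, hs, if_true, List.map_cons, Nat.cast_zero,
        List.cons_append]
  obtain ⟨t0, T', hTeq, ht0⟩ := hT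
  subst ht0
  have hb := pvBounds_append_run silence grp rest hall
  rw [hTeq] at hb
  unfold pvBW
  rw [hb]
  have hpairs : pvPairs (-1 :: ((0 : Int) :: T').map (· + (grp.length : Int)))
      = (-1, (0 : Int) + (grp.length : Int)) :: pvPairs (((0 : Int) :: T').map (· + (grp.length : Int))) := rfl
  rw [hpairs, List.filter_cons]
  have hkeep : (decide ((0 : Int) + (grp.length : Int) - (-1) > 1)) = true := by
    simp only [decide_eq_true_eq]; omega
  rw [hkeep]
  simp only [if_true, List.map_cons]
  have hword : PySem.Str.join " " (PySem.List.slice (grp ++ rest) (some (-1 + 1)) (some ((0 : Int) + (grp.length : Int))))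
      = PySem.Str.join " " grp := by
    refine congrArg _ ?_
    have : (-1 : Int) + 1 = ((0 : Nat) : Int) := by norm_num
    rw [this]
    have : (0 : Int) + (grp.length : Int) = ((grp.length : Nat) : Int) := by ring
    rw [this, PySem.List.slice_natCast]
    simp
  rw [hword]
  refine congrArg _ ?_
  -- tail: shifted pairs of (0 :: T') versus pvBW rest
  have hcons : pvBounds silence rest = -1 :: ((0 : Int) :: T') := by
    have : pvBounds silence rest = -1 :: (pvBounds silence rest).tail := rfl
    rw [this, hTeq]
  have hmc : ((0 : Int) + (grp.length : Int)) :: T'.map (· + (grp.length : Int))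
      = ((0 : Int) :: T').map (· + (grp.length : Int)) := rfl
  rw [hmc, pvPairs_map]
  have hrest : pvPairs (pvBounds silence rest) = (-1, (0 : Int)) :: pvPairs ((0 : Int) :: T') := by
    rw [hcons]; rfl
  conv_rhs => rw [hrest]
  rw [List.filter_cons]
  norm_num
  refine pvShift_block grp rest (pvPairs ((0 : Int) :: T')) ?_
  intro ab hab
  obtain ⟨h1, h2⟩ := pvMem_pairs _ ab.1 ab.2 hab
  have hsub : ∀ z ∈ ((0 : Int) :: T'), 0 ≤ z := by
    intro z hz
    rw [← hTeq] at hz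
    exact pvTail_bounds_nonneg silence rest z hz
  exact ⟨by have := hsub ab.1 h1; omega, hsub ab.2 (List.mem_of_mem_tail h2)⟩

theorem pvGo_eq_BW (silence : String) : ∀ phones : List String,
    pvGo silence [] phones = pvBW silence phones := by
  intro phones
  induction hn : phones.length using Nat.strong_induction_on generalizing phones with
  | _ n ih =>
  match phones with
  | [] => rfl
  | x :: xs =>
    by_cases hx : pvIsSep silence x = true
    · rw [pvGo_sep silence x xs hx, pvBW_sep_cons silence x xs hx]
      exact ih _ (by subst hn; simp) _ rfl
    · have hx' : pvIsSep silence x = false := by simpa using hx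
      set grp := x :: xs.takeWhile (fun y => pvIsSep silence y == false) with hgrp
      set rest := xs.dropWhile (fun y => pvIsSep silence y == false) with hrest
      have hsplit : x :: xs = grp ++ rest := by
        rw [hgrp, hrest, List.cons_append, List.takeWhile_append_dropWhile]
      have hallg : ∀ y ∈ grp, pvIsSep silence y = false := by
        intro y hy
        rcases List.mem_cons.mp hy with rfl | hy
        · exact hx'
        · simpa using List.mem_takeWhile_imp hy
      have hrcond : rest = [] ∨ ∃ s r', rest = s :: r' ∧ pvIsSep silence s = true := by
        cases hdr : rest with
        | nil => exact Or.inl rfl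
        | cons s r' =>
          refine Or.inr ⟨s, r', rfl, ?_⟩
          have h2 := List.head?_dropWhile_not (p := fun y => pvIsSep silence y == false) (l := xs)
          rw [← hrest, hdr] at h2
          simpa using h2
      rw [hsplit, pvGo_take_nonseps silence grp hallg [] rest, List.nil_append,
        pvGo_flush silence grp rest (by simp [hgrp]) hrcond,
        pvBW_run silence grp rest (by simp [hgrp]) hallg hrcond]
      refine congrArg _ ?_
      refine ih rest.length ?_ rest rfl
      subst hn
      rw [hsplit]
      simp [hgrp]
      try omega

-- ===== VERDICT (by name: the statement is the Claim_ definition above) =====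
theorem phones_to_words_spec : Claim_equal_phones_to_words := by
  intro phones silence _
  unfold Spec_phones_to_words
  rw [pvAlt_eq_BW]
  unfold phones_to_words
  by_cases h : phones = []
  · subst h; simp [pvBW_nil]
  · rw [if_neg h]
    have := pvFoldl_eq_go silence phones [] []
    simp only [List.nil_append] at this
    rw [this, pvGo_eq_BW]
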